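-- pv_equiv track=rewrite | github.com/sebimatei2511/python-labs | Lab 2/# Exercitiul 12.py | the_function
-- ===== SOURCE A (Python) =====
-- def the_function(list_input):
--     result_list = []
--     for i in range(0, len(list_input) - 1):
--
--         if list_input[i] != "":
--
--             short_list = []
--             short_list.append(list_input[i])
--
--             for j in range(i + 1, len(list_input)):
--                 if list_input[i] != "" and list_input[j] != "":
--                     if (list_input[i][len(list_input[i]) - 1] == list_input[j][len(list_input[j]) - 1]) and ( list_input[i][len(list_input[i]) - 2] == list_input[j][len(list_input[j]) - 2] ):
--
--                         short_list.append(list_input[j])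
--
--                         list_input[j] = ""
--
--             list_input[i] = ""
--
--             if short_list != []:
--                 result_list.append(short_list)
--
--     if list_input[len(list_input) - 1] != "":
--         short_list = []
--         short_list.append(list_input[len(list_input) - 1])
--         result_list.append(short_list)
--
--     return result_list
-- ===== SOURCE B (Python) =====
-- def the_function(list_input):
--     # Single pass: group the non-empty strings by the pair of characters A compares
--     # (last char, char at len(s)-2 under Python indexing, so for a 1-char string both
--     # are its only char), in an insertion-ordered dict; first-occurrence order of the
--     # keys gives the group order.
--     # NOTE: unlike A, this does not mutate list_input (equivalence is about the return value).
--     groups = {}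
--     for s in list_input:
--         if s != "":
--             key = (s[-1], s[len(s) - 2])
--             groups.setdefault(key, []).append(s)
--     return list(groups.values())
-- ===== Notes on version B (the rewrite author's own statement) =====
-- stated objective: faster
-- what changed: Replaces the destructive quadratic scan (for each survivor, rescan the tail blanking matches) by a single pass that groups non-empty strings in an insertion-ordered dict keyed by the two characters A compares, then returns the dict's values; B also leaves list_input unmutated.
import Mathlib
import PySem

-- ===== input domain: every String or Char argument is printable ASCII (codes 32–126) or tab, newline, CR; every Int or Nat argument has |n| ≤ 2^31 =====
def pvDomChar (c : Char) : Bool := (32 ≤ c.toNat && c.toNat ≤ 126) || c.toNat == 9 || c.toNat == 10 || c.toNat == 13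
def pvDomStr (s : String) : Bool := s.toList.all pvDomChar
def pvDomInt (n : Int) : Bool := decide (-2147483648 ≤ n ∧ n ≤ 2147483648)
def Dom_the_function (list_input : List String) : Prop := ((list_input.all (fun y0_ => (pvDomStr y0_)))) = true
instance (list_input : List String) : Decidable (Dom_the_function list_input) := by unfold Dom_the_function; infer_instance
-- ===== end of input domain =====

-- B replaces A's destructive quadratic rescan by one ordered-dict grouping pass (asymptotically
-- faster); equivalence is about the RETURN value only: A blanks its argument in place, B does not.


-- ===== PORT A =====
-- inner 'for j in range(i+1, len(list_input))' loop body, with si = list_input[i] (unchanged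
-- during the inner loop); state st2 = (short_list, list_input)
def pvInnerF (si : String) (st2 : List String × List String) (j : Int) : List String × List String :=
  let sj := PySem.List.pyGetD st2.2 j ""
  if si ≠ "" ∧ sj ≠ "" then
    if PySem.List.pyGetD si.toList (PySem.Str.len si - 1) ' ' =
         PySem.List.pyGetD sj.toList (PySem.Str.len sj - 1) ' ' ∧
       PySem.List.pyGetD si.toList (PySem.Str.len si - 2) ' ' =
         PySem.List.pyGetD sj.toList (PySem.Str.len sj - 2) ' ' then
      (st2.1 ++ [sj], PySem.List.pySetD st2.2 j "")
    else st2
  else st2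

-- outer 'for i in range(0, len(list_input) - 1)' loop body; state st = (result_list, list_input)
def pvOuterF (n : Int) (st : List (List String) × List String) (i : Int) :
    List (List String) × List String :=
  let si := PySem.List.pyGetD st.2 i ""
  if si ≠ "" then
    let inner := (PySem.List.pyRange (i + 1) n 1).foldl (pvInnerF si) ([si], st.2)
    (if inner.1 ≠ [] then st.1 ++ [inner.1] else st.1, PySem.List.pySetD inner.2 i "")
  else st

def the_function (list_input : List String) : List (List String) :=
  let n : Int := PySem.List.len list_input
  let st := (PySem.List.pyRange 0 (n - 1) 1).foldl (pvOuterF n) ([], list_input)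
  let last := PySem.List.pyGetD st.2 (n - 1) ""
  if last ≠ "" then st.1 ++ [[last]] else st.1

-- ===== PORT B =====
-- key = (s[-1], s[len(s) - 2])
def pvKeyB (s : String) : Char × Char :=
  (PySem.List.pyGetD s.toList (-1) ' ',
   PySem.List.pyGetD s.toList (PySem.Str.len s - 2) ' ')

-- groups.setdefault(key, []).append(s) for the non-empty strings; result = list(groups.values())
def the_function_alt (list_input : List String) : List (List String) :=
  let groups := list_input.foldl
    (fun (d : PySem.Dict (Char × Char) (List String)) s =>
      if s ≠ "" then d.modify (pvKeyB s) [] (· ++ [s]) else d)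
    PySem.Dict.empty
  groups.values

-- ===== PRECONDITION & SPEC =====
-- Pre_ excludes only the empty list, on which A raises IndexError (it reads list_input[-1]).
def Pre_the_function (list_input : List String) : Prop := list_input ≠ []
instance (list_input : List String) : Decidable (Pre_the_function list_input) := by
  unfold Pre_the_function; infer_instance
def pvWitness_the_function : List String := (["ab", "b", "cab"])

def Spec_the_function (list_input : List String) (out : List (List String)) : Prop :=
  out = the_function_alt list_input
instance (list_input : List String) (out : List (List String)) :
    Decidable (Spec_the_function list_input out) := by unfold Spec_the_function; infer_instance

-- ===== CLAIM (what is proved, stated in full; the proofs are below) =====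
def Claim_equal_the_function : Prop := ∀ (list_input : List String),
  Dom_the_function list_input → Pre_the_function list_input →
  Spec_the_function list_input (the_function list_input)

-- ===== LEMMAS AND PROOFS =====

-- the pair of characters A compares for a string s (Python indexing: for len(s) = 1 both are s[0])
def pvKey (s : String) : Char × Char :=
  (PySem.List.pyGetD s.toList (PySem.Str.len s - 1) ' ',
   PySem.List.pyGetD s.toList (PySem.Str.len s - 2) ' ')

def pvCondB (k : Char × Char) (s : String) : Bool := decide (s ≠ "" ∧ pvKey s = k)

-- the group of key k: all non-empty strings of xs whose key is k, in order
def pvGroup (xs : List String) (k : Char × Char) : List String := xs.filter (pvCondB k)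

-- the distinct keys of the non-empty strings of xs, in first-occurrence order
def pvKeys (xs : List String) : List (Char × Char) :=
  PySem.Set.ofList ((xs.filter (fun s => decide (s ≠ ""))).map pvKey)

-- the canonical grouping both programs compute
def pvCanon (xs : List String) : List (List String) := (pvKeys xs).map (pvGroup xs)

-- the state of A's list after the keys in K got their groups: survivors are the
-- non-empty strings whose key is not yet seen
def pvBlank (K : List (Char × Char)) (s : String) : String :=
  if s = "" ∨ pvKey s ∈ K then "" else s

-- A's inner loop body, abstracted over the match test
def pvScanF (c : String → Bool) (st2 : List String × List String) (j : Int) :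
    List String × List String :=
  let sj := PySem.List.pyGetD st2.2 j ""
  if c sj then (st2.1 ++ [sj], PySem.List.pySetD st2.2 j "") else st2

lemma pvKeyB_eq (s : String) (h : s ≠ "") : pvKeyB s = pvKey s := by
  have hl : s.toList ≠ [] := fun hc => h (String.toList_eq_nil_iff.mp hc)
  have h1 : 0 < s.toList.length := List.length_pos_iff.mpr hl
  unfold pvKeyB pvKey
  congr 1
  rw [show PySem.Str.len s - 1 = ((s.toList.length - 1 : Nat) : Int) by
    rw [PySem.Str.len_eq]; omega]
  rw [PySem.List.pyGetD_natCast, PySem.List.pyGetD_neg_one s.toList ' ' hl,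
    List.getLast_eq_getElem, List.getD_eq_getElem _ _ (by omega)]

lemma pvInnerF_eq (si : String) (h : si ≠ "") (st2 : List String × List String) (j : Int) :
    pvInnerF si st2 j = pvScanF (pvCondB (pvKey si)) st2 j := by
  unfold pvInnerF pvScanF pvCondB
  dsimp only
  by_cases hne : PySem.List.pyGetD st2.2 j "" ≠ ""
  · by_cases hk : pvKey (PySem.List.pyGetD st2.2 j "") = pvKey si
    · rw [if_pos ⟨h, hne⟩, if_pos ⟨congrArg Prod.fst hk.symm, congrArg Prod.snd hk.symm⟩,
        if_pos (decide_eq_true ⟨hne, hk⟩)]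
    · rw [if_pos ⟨h, hne⟩,
        if_neg (fun q => hk (Prod.ext q.1.symm q.2.symm)),
        if_neg (fun hd => hk (of_decide_eq_true hd).2)]
  · rw [if_neg (fun q => hne q.2), if_neg (fun hd => hne (of_decide_eq_true hd).1)]

lemma pvScan_spec (c : String → Bool) :
    ∀ (suf pre acc : List String),
    (PySem.List.pyRange (pre.length : Int) ((pre.length + suf.length : Nat) : Int) 1).foldl
        (pvScanF c) (acc, pre ++ suf)
      = (acc ++ suf.filter c, pre ++ suf.map (fun s => if c s then "" else s)) := by
  intro suf
  induction suf with
  | nil =>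
    intro pre acc
    rw [show ((pre.length + List.length ([] : List String) : Nat) : Int) = (pre.length : Int) by
        simp]
    rw [PySem.List.pyRange_one_eq_nil (le_refl _)]
    simp
  | cons s rest ih =>
    intro pre acc
    have hlt : (pre.length : Int) < ((pre.length + (s :: rest).length : Nat) : Int) := by
      simp only [List.length_cons]; push_cast; omega
    rw [PySem.List.pyRange_one_cons hlt, List.foldl_cons]
    have hget : PySem.List.pyGetD (pre ++ s :: rest) (pre.length : Int) "" = s := by
      rw [PySem.List.pyGetD_natCast, List.getD_append_right _ _ _ _ (Nat.le_refl _)]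
      simp [List.getD]
    have hset : PySem.List.pySetD (pre ++ s :: rest) (pre.length : Int) "" = pre ++ "" :: rest := by
      rw [PySem.List.pySetD_natCast, List.set_append_right _ _ (Nat.le_refl _)]
      simp
    have happ : pvScanF c (acc, pre ++ s :: rest) (pre.length : Int)
        = if c s then (acc ++ [s], pre ++ "" :: rest) else (acc, pre ++ s :: rest) := by
      unfold pvScanF
      dsimp only
      rw [hget, hset]
    rw [happ]
    by_cases hcs : c s = true
    · rw [if_pos hcs]
      rw [show (pre.length : Int) + 1 = (((pre ++ [""]).length : Nat) : Int) by simp]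
      rw [show ((pre.length + (s :: rest).length : Nat) : Int)
          = (((pre ++ [""]).length + rest.length : Nat) : Int) by simp; omega]
      have := ih (pre ++ [""]) (acc ++ [s])
      rw [List.append_assoc, List.singleton_append] at this
      rw [this]
      simp [hcs]
    · rw [if_neg hcs]
      rw [show (pre.length : Int) + 1 = (((pre ++ [s]).length : Nat) : Int) by simp]
      rw [show ((pre.length + (s :: rest).length : Nat) : Int)
          = (((pre ++ [s]).length + rest.length : Nat) : Int) by simp; omega]
      have := ih (pre ++ [s]) acc
      rw [List.append_assoc, List.singleton_append] at this
      rw [this]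
      simp [hcs]

lemma pvB_eq_canon (xs : List String) : the_function_alt xs = pvCanon xs := by
  unfold the_function_alt
  dsimp only
  rw [PySem.List.foldl_ite_eq_foldl_filter (p := fun s : String => s ≠ "")
    (f := fun (d : PySem.Dict (Char × Char) (List String)) s => d.modify (pvKeyB s) [] (· ++ [s]))]
  rw [PySem.List.foldl_congr_mem _ _
    (fun (d : PySem.Dict (Char × Char) (List String)) s => d.modify (pvKey s) [] (· ++ [s])) _
    (fun d s hs => by rw [pvKeyB_eq s (by simpa using (List.mem_filter.mp hs).2)])]
  set ys := xs.filter (fun s => decide (s ≠ "")) with hys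
  set d := ys.foldl (fun (d : PySem.Dict (Char × Char) (List String)) s =>
    d.modify (pvKey s) [] (· ++ [s])) PySem.Dict.empty with hd
  have hkeys : d.keys = pvKeys xs := by
    rw [hd, PySem.Dict.keys_foldl_modify_key ys pvKey [] (fun _ s => (· ++ [s]))]
    rw [PySem.Dict.keys_empty]
    rw [PySem.Set.update_nil_left, hys]
    rfl
  have hnodup : d.keys.Nodup := by rw [hkeys]; exact PySem.Set.nodup_ofList _
  have hgetD : ∀ k, d.getD k [] = pvGroup xs k := by
    intro k
    have hsplit : d = (ys.map (fun s => (pvKey s, s))).foldl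
        (fun (d : PySem.Dict (Char × Char) (List String)) p => d.modify p.1 [] (· ++ [p.2]))
        PySem.Dict.empty := by
      rw [hd, List.foldl_map]
    rw [hsplit, PySem.Dict.getD_foldl_modify_append, PySem.Dict.getD_empty, List.nil_append]
    rw [List.filter_map, List.map_map]
    have h1 : (ys.filter ((fun (p : (Char × Char) × String) => p.1 == k) ∘
        (fun s => (pvKey s, s)))).map ((fun (p : (Char × Char) × String) => p.2) ∘
        (fun s => (pvKey s, s))) = ys.filter (fun s => pvKey s == k) := by
      simp only [Function.comp_def]
      simp
    rw [h1, hys, List.filter_filter]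
    apply List.filter_congr
    intro a _
    by_cases h1 : a = "" <;> by_cases h2 : pvKey a = k <;> simp [pvCondB, h1, h2]
  have hvalues : d.values = d.items.map (fun p => p.2) := rfl
  rw [hvalues, PySem.Dict.items_eq_map_keys d hnodup [], List.map_map, hkeys]
  unfold pvCanon
  apply List.map_congr_left
  intro k _
  exact hgetD k

lemma pvBlank_empty (K : List (Char × Char)) : pvBlank K "" = "" := by simp [pvBlank]

lemma pvGetD_blank (xs : List String) (K : List (Char × Char)) (i : Nat) (h : i < xs.length) :
    PySem.List.pyGetD (xs.map (pvBlank K)) (i : Int) "" = pvBlank K (xs[i]'h) := by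
  conv_lhs => rw [← pvBlank_empty K]
  rw [PySem.List.pyGetD_map, PySem.List.pyGetD_natCast, List.getD_eq_getElem _ _ h]

lemma pvKeys_mem_of_mem {xs : List String} {s : String} (hs : s ∈ xs) (hne : s ≠ "") :
    pvKey s ∈ pvKeys xs := by
  unfold pvKeys
  rw [PySem.Set.mem_ofList]
  exact List.mem_map_of_mem (List.mem_filter.mpr ⟨hs, by simpa⟩)

lemma pvKeys_append_ne (l : List String) (s : String) (h : s ≠ "") :
    pvKeys (l ++ [s]) = PySem.Set.add (pvKeys l) (pvKey s) := by
  unfold pvKeys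
  rw [List.filter_append, List.map_append, show List.filter (fun s => decide (s ≠ "")) [s] = [s]
    by simp [h]]
  exact PySem.Set.ofList_append_singleton _ _

lemma pvKeys_append_empty (l : List String) : pvKeys (l ++ [""]) = pvKeys l := by
  unfold pvKeys
  rw [List.filter_append]
  simp

lemma pvBlank_eq_self {K : List (Char × Char)} {s : String} (h1 : s ≠ "") (h2 : pvKey s ∉ K) :
    pvBlank K s = s := by
  unfold pvBlank
  rw [if_neg (by push_neg; exact ⟨h1, h2⟩)]

lemma pvBlank_prefix {K : List (Char × Char)} {k : Char × Char} {l : List String}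
    (hmem : ∀ s ∈ l, s ≠ "" → pvKey s ∈ K) :
    ∀ s ∈ l, pvBlank K s = pvBlank (K ++ [k]) s := by
  intro s hs
  unfold pvBlank
  by_cases h0 : s = ""
  · simp [h0]
  · have := hmem s hs h0
    simp [h0, this]

lemma pvBlank_step (K : List (Char × Char)) (k : Char × Char) (hk : k ∉ K) (s : String) :
    (if pvCondB k (pvBlank K s) = true then "" else pvBlank K s) = pvBlank (K ++ [k]) s := by
  by_cases hz : s = "" ∨ pvKey s ∈ K
  · have e1 : pvBlank K s = "" := by unfold pvBlank; rw [if_pos hz]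
    have e2 : pvBlank (K ++ [k]) s = "" := by
      unfold pvBlank
      rcases hz with hz | hz
      · rw [if_pos (Or.inl hz)]
      · rw [if_pos (Or.inr (List.mem_append.mpr (Or.inl hz)))]
    rw [e1, e2]
    simp [pvCondB]
  · push_neg at hz
    obtain ⟨h0, h1⟩ := hz
    rw [pvBlank_eq_self h0 h1]
    by_cases h2 : pvKey s = k
    · rw [if_pos (show pvCondB k s = true from decide_eq_true ⟨h0, h2⟩)]
      unfold pvBlank
      rw [if_pos (Or.inr (List.mem_append.mpr (Or.inr (List.mem_singleton.mpr h2))))]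
    · rw [if_neg (show ¬ pvCondB k s = true from fun hd => h2 (of_decide_eq_true hd).2)]
      unfold pvBlank
      rw [if_neg (show ¬(s = "" ∨ pvKey s ∈ K ++ [k]) by
        push_neg
        exact ⟨h0, by simp [h1, h2]⟩)]

lemma pvFilter_blank (K : List (Char × Char)) (k : Char × Char) (hk : k ∉ K) (l : List String) :
    (l.map (pvBlank K)).filter (pvCondB k) = l.filter (pvCondB k) := by
  have hp : ∀ s, pvCondB k (pvBlank K s) = pvCondB k s := by
    intro s
    unfold pvBlank pvCondB
    by_cases h0 : s = ""
    · simp [h0]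
    · by_cases h1 : pvKey s ∈ K
      · have h2 : pvKey s ≠ k := fun e => hk (e ▸ h1)
        simp [h0, h1, h2]
      · simp [h0, h1]
  calc (l.map (pvBlank K)).filter (pvCondB k)
      = (l.filter (pvCondB k ∘ pvBlank K)).map (pvBlank K) := List.filter_map
    _ = (l.filter (pvCondB k)).map (pvBlank K) := by
        congr 1
        exact List.filter_congr (fun a _ => hp a)
    _ = l.filter (pvCondB k) := by
        have hid : ∀ a ∈ l.filter (pvCondB k), pvBlank K a = a := by
          intro a ha
          obtain ⟨hane, hak⟩ := of_decide_eq_true (List.mem_filter.mp ha).2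
          exact pvBlank_eq_self hane (hak ▸ hk)
        rw [List.map_congr_left hid, List.map_id']

lemma pvGroup_split (xs : List String) (i : Nat) (h : i < xs.length) (x : String)
    (hx : xs[i]'h = x) (hne : x ≠ "") (hK : pvKey x ∉ pvKeys (xs.take i)) :
    pvGroup xs (pvKey x) = x :: pvGroup (xs.drop (i + 1)) (pvKey x) := by
  conv_lhs => rw [show xs = xs.take (i + 1) ++ xs.drop (i + 1) from (List.take_append_drop _ _).symm]
  unfold pvGroup
  rw [List.filter_append]
  have htake : (xs.take (i + 1)).filter (pvCondB (pvKey x)) = [x] := by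
    rw [List.take_add_one, List.getElem?_eq_getElem h, hx, List.filter_append]
    have h1 : (xs.take i).filter (pvCondB (pvKey x)) = [] := by
      rw [List.filter_eq_nil_iff]
      intro a ha hcond
      obtain ⟨hane, hak⟩ := of_decide_eq_true hcond
      exact hK (hak ▸ pvKeys_mem_of_mem ha hane)
    rw [h1, List.nil_append]
    simp [pvCondB, hne]
  rw [htake, List.singleton_append]

lemma pvOuter_inv (xs : List String) (i : Nat) (hi : i ≤ xs.length) :
    (PySem.List.pyRange 0 (i : Int) 1).foldl (pvOuterF (xs.length : Int)) ([], xs)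
      = ((pvKeys (xs.take i)).map (pvGroup xs), xs.map (pvBlank (pvKeys (xs.take i)))) := by
  induction i with
  | zero =>
    rw [show ((0 : Nat) : Int) = 0 from rfl, PySem.List.pyRange_one_eq_nil (le_refl 0),
      List.foldl_nil]
    refine Prod.ext rfl ?_
    have hbl : ∀ s ∈ xs, pvBlank (pvKeys (xs.take 0)) s = s := by
      intro s _
      have hk0 : pvKeys ([] : List String) = [] := rfl
      unfold pvBlank
      by_cases h0 : s = "" <;> simp [h0, List.take_zero, hk0]
    rw [List.map_congr_left hbl, List.map_id']
  | succ i ih =>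
    have hi' : i ≤ xs.length := Nat.le_of_succ_le hi
    have hilen : i < xs.length := hi
    rw [show ((i + 1 : Nat) : Int) = (i : Int) + 1 by push_cast; rfl,
      PySem.List.pyRange_one_succ_right (Int.natCast_nonneg i), List.foldl_append, ih hi',
      List.foldl_cons, List.foldl_nil]
    unfold pvOuterF
    dsimp only
    rw [pvGetD_blank xs _ i hilen]
    set K := pvKeys (xs.take i) with hKdef
    by_cases hb : pvBlank K (xs[i]'hilen) ≠ ""
    · have hcond : ¬((xs[i]'hilen) = "" ∨ pvKey (xs[i]'hilen) ∈ K) := by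
        intro hc
        exact hb (by unfold pvBlank; rw [if_pos hc])
      push_neg at hcond
      obtain ⟨hne, hkm⟩ := hcond
      have hbs : pvBlank K (xs[i]'hilen) = xs[i]'hilen := pvBlank_eq_self hne hkm
      rw [if_pos hb, hbs]
      rw [PySem.List.foldl_congr_mem _ _ _ _
        (fun acc x _ => pvInnerF_eq (xs[i]'hilen) hne acc x)]
      have hsplitM : xs.map (pvBlank K)
          = (xs.take (i + 1)).map (pvBlank K) ++ (xs.drop (i + 1)).map (pvBlank K) := by
        rw [← List.map_append, List.take_append_drop]
      have hprelen : ((xs.take (i + 1)).map (pvBlank K)).length = i + 1 := by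
        simp [List.length_take]
        omega
      rw [hsplitM,
        show (i : Int) + 1 = ((((xs.take (i + 1)).map (pvBlank K)).length : Nat) : Int) by
          rw [hprelen]; push_cast; rfl,
        show ((xs.length : Nat) : Int) = ((((xs.take (i + 1)).map (pvBlank K)).length
            + ((xs.drop (i + 1)).map (pvBlank K)).length : Nat) : Int) by
          simp [hprelen]; omega,
        pvScan_spec]
      dsimp only
      rw [pvFilter_blank K (pvKey (xs[i]'hilen)) hkm (xs.drop (i + 1)), List.singleton_append]
      have hkeys1 : pvKeys (xs.take (i + 1)) = K ++ [pvKey (xs[i]'hilen)] := by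
        rw [List.take_add_one, List.getElem?_eq_getElem hilen]
        show pvKeys (xs.take i ++ [xs[i]'hilen]) = _
        rw [pvKeys_append_ne _ _ hne, PySem.Set.add_of_not_mem hkm]
      refine Prod.ext ?_ ?_
      · show (if ((xs[i]'hilen) :: pvGroup (xs.drop (i + 1)) (pvKey (xs[i]'hilen))) ≠ []
            then K.map (pvGroup xs) ++ [_] else K.map (pvGroup xs)) = _
        rw [if_pos (by simp), hkeys1, List.map_append]
        show K.map (pvGroup xs) ++ [(xs[i]'hilen) :: pvGroup (xs.drop (i + 1)) (pvKey (xs[i]'hilen))]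
            = K.map (pvGroup xs) ++ [pvGroup xs (pvKey (xs[i]'hilen))]
        rw [pvGroup_split xs i hilen _ rfl hne hkm]
      · show PySem.List.pySetD ((xs.take (i + 1)).map (pvBlank K)
            ++ ((xs.drop (i + 1)).map (pvBlank K)).map
                (fun s => if pvCondB (pvKey (xs[i]'hilen)) s = true then "" else s)) (i : Int) ""
            = xs.map (pvBlank (pvKeys (xs.take (i + 1))))
        rw [hkeys1, List.map_map]
        have htail : ((xs.drop (i + 1)).map ((fun s =>
            if pvCondB (pvKey (xs[i]'hilen)) s = true then "" else s) ∘ pvBlank K))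
            = (xs.drop (i + 1)).map (pvBlank (K ++ [pvKey (xs[i]'hilen)])) :=
          List.map_congr_left (fun a _ => pvBlank_step K _ hkm a)
        rw [htail, PySem.List.pySetD_natCast,
          List.set_append_left _ _ (by rw [hprelen]; try omega)]
        have hpre : ((xs.take (i + 1)).map (pvBlank K)).set i ""
            = (xs.take (i + 1)).map (pvBlank (K ++ [pvKey (xs[i]'hilen)])) := by
          rw [List.take_add_one, List.getElem?_eq_getElem hilen]
          show ((xs.take i ++ [xs[i]'hilen]).map (pvBlank K)).set i ""
              = (xs.take i ++ [xs[i]'hilen]).map (pvBlank (K ++ [pvKey (xs[i]'hilen)]))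
          rw [List.map_append, List.map_append,
            List.set_append_right _ _ (by simp [List.length_take])]
          have hlen2 : ((xs.take i).map (pvBlank K)).length = i := by
            simp [List.length_take]; omega
          have hblast : pvBlank (K ++ [pvKey (xs[i]'hilen)]) (xs[i]'hilen) = "" := by
            unfold pvBlank
            rw [if_pos (Or.inr (List.mem_append.mpr (Or.inr (List.mem_singleton.mpr rfl))))]
          have hmemK : ∀ s ∈ xs.take i, s ≠ "" → pvKey s ∈ K := by
            intro s hs h0
            rw [hKdef]
            exact pvKeys_mem_of_mem hs h0
          rw [hlen2, Nat.sub_self,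
            List.map_congr_left (pvBlank_prefix (k := pvKey (xs[i]'hilen)) hmemK)]
          simp [hblast]
        rw [hpre, ← List.map_append, List.take_append_drop]
    · push_neg at hb
      rw [if_neg (by simpa using hb)]
      have hKs : pvKeys (xs.take (i + 1)) = K := by
        rw [List.take_add_one, List.getElem?_eq_getElem hilen]
        by_cases h0 : (xs[i]'hilen) = ""
        · show pvKeys (xs.take i ++ [xs[i]'hilen]) = K
          rw [h0, pvKeys_append_empty]
        · have hmem : pvKey (xs[i]'hilen) ∈ K := by
            by_contra hnm
            exact h0 (by rw [← pvBlank_eq_self h0 hnm, hb])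
          show pvKeys (xs.take i ++ [xs[i]'hilen]) = K
          rw [pvKeys_append_ne _ _ h0, PySem.Set.add_of_mem hmem]
      rw [hKs]

lemma pvA_eq_canon (xs : List String) (h : xs ≠ []) : the_function xs = pvCanon xs := by
  have hlen : 0 < xs.length := List.length_pos_iff.mpr h
  unfold the_function
  dsimp only
  rw [PySem.List.len_eq]
  rw [show (xs.length : Int) - 1 = ((xs.length - 1 : Nat) : Int) by omega]
  rw [pvOuter_inv xs (xs.length - 1) (by omega)]
  dsimp only
  rw [pvGetD_blank xs _ (xs.length - 1) (by omega)]
  set m := xs.length - 1 with hm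
  set K := pvKeys (xs.take m) with hKdef
  have hms : m + 1 = xs.length := by omega
  have hmlt : m < xs.length := by omega
  have hx : xs.take (m + 1) = xs := by rw [hms, List.take_length]
  by_cases hb : pvBlank K (xs[m]'hmlt) ≠ ""
  · have hcond : ¬((xs[m]'hmlt) = "" ∨ pvKey (xs[m]'hmlt) ∈ K) := fun hc =>
      hb (by unfold pvBlank; rw [if_pos hc])
    push_neg at hcond
    obtain ⟨hne, hkm⟩ := hcond
    rw [if_pos hb, pvBlank_eq_self hne hkm]
    unfold pvCanon
    have h1 : pvKeys xs = K ++ [pvKey (xs[m]'hmlt)] := by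
      conv_lhs => rw [← hx]
      rw [List.take_add_one, List.getElem?_eq_getElem hmlt]
      show pvKeys (xs.take m ++ [xs[m]'hmlt]) = _
      rw [pvKeys_append_ne _ _ hne, PySem.Set.add_of_not_mem hkm]
    have h2 : pvGroup xs (pvKey (xs[m]'hmlt)) = [xs[m]'hmlt] := by
      rw [pvGroup_split xs m hmlt _ rfl hne hkm,
        show xs.drop (m + 1) = [] by rw [hms, List.drop_length]]
      rfl
    rw [h1, List.map_append, List.map_singleton, h2]
  · push_neg at hb
    rw [if_neg (by simpa using hb)]
    unfold pvCanon
    have hKs : pvKeys xs = K := by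
      conv_lhs => rw [← hx]
      rw [List.take_add_one, List.getElem?_eq_getElem hmlt]
      by_cases h0 : (xs[m]'hmlt) = ""
      · show pvKeys (xs.take m ++ [xs[m]'hmlt]) = K
        rw [h0, pvKeys_append_empty]
      · have hmem : pvKey (xs[m]'hmlt) ∈ K := by
          by_contra hnm
          exact h0 (by rw [← pvBlank_eq_self h0 hnm, hb])
        show pvKeys (xs.take m ++ [xs[m]'hmlt]) = K
        rw [pvKeys_append_ne _ _ h0, PySem.Set.add_of_mem hmem]
    rw [hKs]

-- ===== VERDICT (by name: the statement is the Claim_ definition above) =====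
theorem the_function_spec : Claim_equal_the_function := by
  intro xs _ hpre
  unfold Spec_the_function
  rw [pvA_eq_canon xs hpre, pvB_eq_canon xs]
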